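-- pv_equiv track=rewrite | github.com/wylu/leetcodecn | src/python/contest/week242/5763.哪种连续子字符串更长.py | checkZeroOnes
-- ===== SOURCE A (Python) =====
-- def checkZeroOnes(s: str) -> bool:
--     c0 = c1 = 0
--
--     if s[0] == '0':
--         c0 = 1
--     else:
--         c1 = 1
--
--     n = len(s)
--     pre, cur = 0, 1
--     while cur < n:
--         while cur < n and s[cur] == s[pre]:
--             cur += 1
--         if s[pre] == '0':
--             c0 = max(c0, cur - pre)
--         else:
--             c1 = max(c1, cur - pre)
--         pre = cur
--     return c1 > c0
-- ===== SOURCE B (Python) =====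
-- def checkZeroOnes(s: str) -> bool:
--     c0 = c1 = run = 0
--     prev = None
--     for ch in s:
--         run = run + 1 if ch == prev else 1
--         prev = ch
--         if ch == '0':
--             c0 = max(c0, run)
--         else:
--             c1 = max(c1, run)
--     return c1 > c0
-- ===== Notes on version B (the rewrite author's own statement) =====
-- stated objective: simpler
-- what changed: Replaced the nested two-pointer while-loops with index arithmetic and repeated s[i] lookups by a single for-loop directly over the characters that keeps the current run length and updates the running maxima; the direct iteration avoids per-character indexing and is measurably faster by a constant factor.
import Mathlib
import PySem

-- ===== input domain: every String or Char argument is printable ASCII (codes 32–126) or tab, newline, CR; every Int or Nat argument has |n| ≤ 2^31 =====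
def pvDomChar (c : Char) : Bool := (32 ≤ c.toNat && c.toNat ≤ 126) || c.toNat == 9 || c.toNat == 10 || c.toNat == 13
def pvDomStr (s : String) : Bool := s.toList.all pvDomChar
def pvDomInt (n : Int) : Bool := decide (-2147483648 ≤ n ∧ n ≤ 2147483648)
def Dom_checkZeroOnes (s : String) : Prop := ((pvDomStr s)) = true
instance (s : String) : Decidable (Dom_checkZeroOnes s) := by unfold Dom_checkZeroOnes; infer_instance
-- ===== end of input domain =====

-- B replaces A's nested two-pointer while-loops with a single one-pass fold keeping the
-- current run length and updating running maxima at each character (objective: simpler).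

-- ===== PORT A =====
-- the inner 'while cur < n and s[cur] == s[pre]: cur += 1'
def pvAInner (l : List Char) (pre cur : Nat) : Nat :=
  if cur < l.length ∧ l.getD cur ' ' = l.getD pre ' ' then pvAInner l pre (cur + 1) else cur
termination_by l.length - cur
decreasing_by omega

-- the outer 'while cur < n: …', returning the final (c0, c1); fuel only makes the
-- recursion total, l.length + 1 iterations always suffice
def pvAOuter (fuel : Nat) (l : List Char) (c0 c1 pre cur : Nat) : Nat × Nat :=
  match fuel with
  | 0 => (c0, c1)
  | f + 1 =>
    if cur < l.length then
      let cur' := pvAInner l pre cur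
      if l.getD pre ' ' = '0' then
        pvAOuter f l (max c0 (cur' - pre)) c1 cur' cur'
      else
        pvAOuter f l c0 (max c1 (cur' - pre)) cur' cur'
    else (c0, c1)

def checkZeroOnes (s : String) : Bool :=
  match s.toList with
  | [] => false    -- Python raises IndexError at s[0]; excluded by Pre_checkZeroOnes
  | c :: _ =>
    let l := s.toList
    let init : Nat × Nat := if c = '0' then (1, 0) else (0, 1)
    let r := pvAOuter (l.length + 1) l init.1 init.2 0 1
    r.2 > r.1

-- ===== PORT B =====
-- one step of Source B's for-loop over the characters; state = (c0, c1, run, prev)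
def pvBStep (st : Nat × Nat × Nat × Option Char) (ch : Char) : Nat × Nat × Nat × Option Char :=
  let run := if some ch = st.2.2.2 then st.2.2.1 + 1 else 1
  if ch = '0' then (max st.1 run, st.2.1, run, some ch)
  else (st.1, max st.2.1 run, run, some ch)

def checkZeroOnes_alt (s : String) : Bool :=
  let st := s.toList.foldl pvBStep (0, 0, 0, none)
  st.2.1 > st.1

-- ===== PRECONDITION & SPEC =====
-- Pre_ excludes only the empty string, on which Python A raises IndexError (s[0]).
def Pre_checkZeroOnes (s : String) : Prop := s ≠ ""
instance (s : String) : Decidable (Pre_checkZeroOnes s) := by unfold Pre_checkZeroOnes; infer_instance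
def pvWitness_checkZeroOnes : String := "0110"

def Spec_checkZeroOnes (s : String) (out : Bool) : Prop := out = checkZeroOnes_alt s
instance (s : String) (out : Bool) : Decidable (Spec_checkZeroOnes s out) := by unfold Spec_checkZeroOnes; infer_instance

-- ===== CLAIM (what is proved, stated in full; the proofs are below) =====
def Claim_equal_checkZeroOnes : Prop := ∀ (s : String), Dom_checkZeroOnes s → Pre_checkZeroOnes s → Spec_checkZeroOnes s (checkZeroOnes s)

-- ===== LEMMAS AND PROOFS =====

-- componentwise max of (c0, c1) pairs
def pvMerge (x y : Nat × Nat) : Nat × Nat := (max x.1 y.1, max x.2 y.2)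

-- record a run of k copies of c into (c0, c1)
def pvUpd (c : Char) (k : Nat) (x : Nat × Nat) : Nat × Nat :=
  if c = '0' then (max x.1 k, x.2) else (x.1, max x.2 k)

-- longest-run pair (longest '0'-run, longest other-run) of a list, run by run
def pvMaxes : List Char → Nat × Nat
  | [] => (0, 0)
  | c :: t => pvUpd c (1 + (t.takeWhile (· = c)).length) (pvMaxes (t.dropWhile (· = c)))
termination_by l => l.length
decreasing_by
  have := List.length_dropWhile_le (fun x => decide (x = c)) t
  simpa using Nat.lt_succ_of_le this

-- the maxima contributed by the rest of the input, given a current run of p of length j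
def pvMaxes2 (p : Char) (j : Nat) (t : List Char) : Nat × Nat :=
  pvUpd p (j + (t.takeWhile (· = p)).length) (pvMaxes (t.dropWhile (· = p)))

def pvComp (c : Char) (x : Nat × Nat) : Nat := if c = '0' then x.1 else x.2

lemma pvMerge_zero (x : Nat × Nat) : pvMerge x (0, 0) = x := by
  simp [pvMerge]

lemma pvMerge_zero_left (x : Nat × Nat) : pvMerge (0, 0) x = x := by
  simp [pvMerge]

lemma pvMerge_upd (c : Char) (k : Nat) (x y : Nat × Nat) :
    pvMerge (pvUpd c k x) y = pvMerge x (pvUpd c k y) := by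
  by_cases h : c = '0' <;> simp [pvMerge, pvUpd, h, Nat.max_comm, Nat.max_left_comm]

lemma pvUpd_absorb (c : Char) (a : Nat) (x : Nat × Nat) (h : a ≤ pvComp c x) :
    pvUpd c a x = x := by
  by_cases hc : c = '0' <;> simp_all [pvUpd, pvComp]

lemma pvComp_upd (c : Char) (k : Nat) (x : Nat × Nat) : pvComp c (pvUpd c k x) = max (pvComp c x) k := by
  by_cases h : c = '0' <;> simp [pvUpd, pvComp, h]

lemma pvComp_maxes2 (p : Char) (j : Nat) (t : List Char) : j ≤ pvComp p (pvMaxes2 p j t) := by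
  rw [pvMaxes2, pvComp_upd]; omega

lemma pvMerge_absorb (c : Char) (a : Nat) (x y : Nat × Nat) (h : a ≤ pvComp c y) :
    pvMerge x (pvUpd c a y) = pvMerge x y := by
  rw [pvUpd_absorb c a y h]

lemma dropWhile_eq_drop (p : Char → Bool) (t : List Char) :
    t.dropWhile p = t.drop (t.takeWhile p).length := by
  induction t with
  | nil => simp
  | cons c t ih => by_cases h : p c <;> simp [List.dropWhile, List.takeWhile, h, ih]

lemma pvAInner_spec (l : List Char) (pre cur : Nat) :
    pvAInner l pre cur = cur + ((l.drop cur).takeWhile (· = l.getD pre ' ')).length := by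
  induction cur using pvAInner.induct l pre with
  | case1 cur hcond ih =>
    obtain ⟨hcur, heq⟩ := hcond
    rw [pvAInner, if_pos ⟨hcur, heq⟩, ih,
        List.drop_eq_getElem_cons hcur, List.takeWhile_cons]
    have hg : l[cur] = l.getD cur ' ' := (List.getD_eq_getElem l ' ' hcur).symm
    rw [if_pos (by simp only [decide_eq_true_eq, hg]; exact heq), List.length_cons]
    omega
  | case2 cur hcond =>
    rw [pvAInner, if_neg hcond]
    by_cases hcur : cur < l.length
    · have heq : ¬ l.getD cur ' ' = l.getD pre ' ' := fun h => hcond ⟨hcur, h⟩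
      rw [List.drop_eq_getElem_cons hcur, List.takeWhile_cons]
      have hg : l[cur] = l.getD cur ' ' := (List.getD_eq_getElem l ' ' hcur).symm
      rw [if_neg (by simp only [decide_eq_true_eq, hg]; exact heq)]
      simp
    · rw [List.drop_eq_nil_of_le (Nat.le_of_not_lt hcur)]
      simp

-- outer loop from a loop-head state pre = cur, with sufficient fuel
lemma pvAOuter_spec (fuel : Nat) : ∀ (l : List Char) (pre c0 c1 : Nat),
    pre ≤ l.length → l.length - pre < fuel →
    pvAOuter fuel l c0 c1 pre pre = pvMerge (c0, c1) (pvMaxes (l.drop pre)) := by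
  induction fuel with
  | zero => intro l pre c0 c1 h1 h2; omega
  | succ f ih =>
    intro l pre c0 c1 hpre hfuel
    by_cases hlt : pre < l.length
    · have hdrop := List.drop_eq_getElem_cons hlt
      have hg : l.getD pre ' ' = l[pre] := List.getD_eq_getElem l ' ' hlt
      have hinner : pvAInner l pre pre
          = pre + (1 + ((l.drop (pre + 1)).takeWhile (· = l[pre])).length) := by
        rw [pvAInner_spec, hg, hdrop, List.takeWhile_cons, if_pos (by simp), List.length_cons]
        omega
      have hk : ((l.drop (pre + 1)).takeWhile (· = l[pre])).length ≤ (l.drop (pre + 1)).length :=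
        (List.takeWhile_prefix _).length_le
      have hlen : (l.drop (pre + 1)).length = l.length - (pre + 1) := List.length_drop
      set k := ((l.drop (pre + 1)).takeWhile (· = l[pre])).length with hkdef
      have hdw : l.drop (pre + (1 + k)) = (l.drop (pre + 1)).dropWhile (· = l[pre]) := by
        rw [dropWhile_eq_drop, ← hkdef, List.drop_drop]
        congr 1
        omega
      have hmax : pvMaxes (l.drop pre)
          = pvUpd l[pre] (1 + k) (pvMaxes ((l.drop (pre + 1)).dropWhile (· = l[pre]))) := by
        rw [hdrop, pvMaxes]
      have hrec : ∀ a b : Nat, pvAOuter f l a b (pre + (1 + k)) (pre + (1 + k))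
          = pvMerge (a, b) (pvMaxes ((l.drop (pre + 1)).dropWhile (· = l[pre]))) := by
        intro a b
        rw [ih l (pre + (1 + k)) a b (by omega) (by omega), hdw]
      rw [pvAOuter, if_pos hlt, hinner, hg]
      by_cases hc0 : l[pre] = '0'
      · rw [if_pos hc0, hrec, hmax, hc0]
        have h2 : pre + (1 + k) - pre = 1 + k := by omega
        rw [h2, show (max c0 (1 + k), c1) = pvUpd '0' (1 + k) (c0, c1) by simp [pvUpd],
            pvMerge_upd]
      · rw [if_neg hc0, hrec, hmax]
        have h2 : pre + (1 + k) - pre = 1 + k := by omega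
        rw [h2, show (c0, max c1 (1 + k)) = pvUpd l[pre] (1 + k) (c0, c1) by simp [pvUpd, hc0],
            pvMerge_upd]
    · have hpe : pre = l.length := by omega
      rw [pvAOuter, if_neg hlt, hpe, List.drop_length, pvMaxes, pvMerge_zero]

-- one step of the alt fold, written through pvUpd
lemma pvBStep_eq_pos (c0 c1 j : Nat) (ch : Char) :
    pvBStep (c0, c1, j, some ch) ch =
      ((pvUpd ch (j + 1) (c0, c1)).1, (pvUpd ch (j + 1) (c0, c1)).2, j + 1, some ch) := by
  by_cases h0 : ch = '0' <;> simp [pvBStep, pvUpd, h0]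

lemma pvBStep_eq_neg (c0 c1 j : Nat) (p ch : Char) (hp : ch ≠ p) :
    pvBStep (c0, c1, j, some p) ch =
      ((pvUpd ch 1 (c0, c1)).1, (pvUpd ch 1 (c0, c1)).2, 1, some ch) := by
  have hsp : (some ch = some p) = False := by simp [hp]
  simp only [pvBStep, hsp, if_false]
  by_cases h0 : ch = '0' <;> simp [pvUpd, h0]

-- the alt fold from a mid-run state: current run of p has length j, already recorded
lemma pvBFold_spec (t : List Char) : ∀ (c0 c1 j : Nat) (p : Char),
    1 ≤ j → j ≤ pvComp p (c0, c1) →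
    (let F := t.foldl pvBStep (c0, c1, j, some p); (F.1, F.2.1))
      = pvMerge (c0, c1) (pvMaxes2 p j t) := by
  induction t with
  | nil =>
    intro c0 c1 j p hj hcomp
    simp only [List.foldl_nil]
    rw [pvMaxes2]
    simp only [List.takeWhile_nil, List.dropWhile_nil, List.length_nil, Nat.add_zero, pvMaxes]
    rw [← pvMerge_upd, pvUpd_absorb p j _ hcomp, pvMerge_zero]
  | cons ch t ih =>
    intro c0 c1 j p hj hcomp
    by_cases hp : ch = p
    · subst hp
      rw [List.foldl_cons, pvBStep_eq_pos]
      have h1 := ih (pvUpd ch (j + 1) (c0, c1)).1 (pvUpd ch (j + 1) (c0, c1)).2 (j + 1) ch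
          (by omega) (by rw [pvComp_upd]; exact Nat.le_max_right _ _)
      simp only at h1 ⊢
      rw [h1, pvMerge_upd, pvMerge_absorb ch (j + 1) _ _ (pvComp_maxes2 ch (j + 1) t)]
      have hRHS : pvMaxes2 ch j (ch :: t) = pvMaxes2 ch (j + 1) t := by
        rw [pvMaxes2, pvMaxes2, List.takeWhile_cons, if_pos (by simp), List.length_cons,
            List.dropWhile_cons, if_pos (by simp)]
        congr 1
        omega
      rw [hRHS]
    · rw [List.foldl_cons, pvBStep_eq_neg c0 c1 j p ch hp]
      have h1 := ih (pvUpd ch 1 (c0, c1)).1 (pvUpd ch 1 (c0, c1)).2 1 ch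
          (by omega) (by rw [pvComp_upd]; exact Nat.le_max_right _ _)
      simp only at h1 ⊢
      rw [h1, pvMerge_upd, pvMerge_absorb ch 1 _ _ (pvComp_maxes2 ch 1 t)]
      have hRHS : pvMaxes2 p j (ch :: t) = pvUpd p j (pvMaxes2 ch 1 t) := by
        rw [pvMaxes2, List.takeWhile_cons, if_neg (by simpa using hp),
            List.dropWhile_cons, if_neg (by simpa using hp), List.length_nil, Nat.add_zero,
            pvMaxes, pvMaxes2]
      rw [hRHS, ← pvMerge_upd, pvUpd_absorb p j _ hcomp]

-- A's loop started from the initial state pre = 0, cur = 1, counters = pvUpd c 1 (0,0)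
lemma pvAOuter_start (c : Char) (t : List Char) :
    pvAOuter ((c :: t).length + 1) (c :: t) (pvUpd c 1 (0, 0)).1 (pvUpd c 1 (0, 0)).2 0 1
      = pvMaxes (c :: t) := by
  cases t with
  | nil => by_cases hc : c = '0' <;> simp [pvAOuter, pvMaxes, pvUpd, hc]
  | cons c2 t2 =>
    have hlen : 1 < (c :: c2 :: t2).length := by simp
    have hk0 : ((c2 :: t2).takeWhile (· = c)).length ≤ (c2 :: t2).length :=
      (List.takeWhile_prefix _).length_le
    set k0 := ((c2 :: t2).takeWhile (· = c)).length with hk0def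
    have hg0 : (c :: c2 :: t2).getD 0 ' ' = c := rfl
    have hinner : pvAInner (c :: c2 :: t2) 0 1 = 1 + k0 := by
      rw [pvAInner_spec, hg0]
      rfl
    have hdw : (c :: c2 :: t2).drop (1 + k0) = (c2 :: t2).dropWhile (· = c) := by
      rw [dropWhile_eq_drop, ← hk0def, Nat.add_comm, List.drop_succ_cons]
    have hmax : pvMaxes (c :: c2 :: t2)
        = pvUpd c (1 + k0) (pvMaxes ((c2 :: t2).dropWhile (· = c))) := by
      rw [pvMaxes]
    have hle : 1 + k0 ≤ (c :: c2 :: t2).length := by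
      simp only [List.length_cons] at hk0 ⊢; omega
    have hfu : (c :: c2 :: t2).length - (1 + k0) < (c :: c2 :: t2).length := by
      simp only [List.length_cons]; omega
    rw [pvAOuter, if_pos hlen, hinner, hg0]
    by_cases hc0 : c = '0'
    · rw [if_pos hc0, pvAOuter_spec _ _ _ _ _ hle hfu, hdw, hmax]
      apply Prod.ext <;> simp [pvMerge, pvUpd, hc0] <;> try omega
    · rw [if_neg hc0, pvAOuter_spec _ _ _ _ _ hle hfu, hdw, hmax]
      apply Prod.ext <;> simp [pvMerge, pvUpd, hc0] <;> try omega

lemma checkZeroOnes_eq (s : String) (c : Char) (t : List Char) (h : s.toList = c :: t) :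
    checkZeroOnes s = decide ((pvMaxes (c :: t)).2 > (pvMaxes (c :: t)).1) := by
  simp only [checkZeroOnes, h]
  rw [show (if c = '0' then ((1 : Nat), (0 : Nat)) else (0, 1)) = pvUpd c 1 (0, 0) by
        by_cases hc : c = '0' <;> simp [pvUpd, hc],
      pvAOuter_start]

lemma pvBStep_none (c : Char) :
    pvBStep (0, 0, 0, none) c = ((pvUpd c 1 (0, 0)).1, (pvUpd c 1 (0, 0)).2, 1, some c) := by
  by_cases hc : c = '0' <;> simp [pvBStep, pvUpd, hc]

lemma checkZeroOnes_alt_eq (s : String) (c : Char) (t : List Char) (h : s.toList = c :: t) :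
    checkZeroOnes_alt s = decide ((pvMaxes (c :: t)).2 > (pvMaxes (c :: t)).1) := by
  simp only [checkZeroOnes_alt, h, List.foldl_cons, pvBStep_none]
  have h2 := pvBFold_spec t (pvUpd c 1 (0, 0)).1 (pvUpd c 1 (0, 0)).2 1 c le_rfl
    (by show 1 ≤ pvComp c (pvUpd c 1 (0, 0)); rw [pvComp_upd]; exact Nat.le_max_right _ _)
  simp only at h2
  have h3 : pvMerge ((pvUpd c 1 (0, 0)).1, (pvUpd c 1 (0, 0)).2) (pvMaxes2 c 1 t)
      = pvMaxes (c :: t) := by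
    show pvMerge (pvUpd c 1 (0, 0)) (pvMaxes2 c 1 t) = pvMaxes (c :: t)
    rw [pvMerge_upd, pvMerge_zero_left, pvUpd_absorb c 1 _ (pvComp_maxes2 c 1 t),
        pvMaxes, pvMaxes2]
  have h4 := h2.trans h3
  have e1 : (List.foldl pvBStep ((pvUpd c 1 (0, 0)).1, (pvUpd c 1 (0, 0)).2, 1, some c) t).1
      = (pvMaxes (c :: t)).1 := by rw [← h4]
  have e2 : (List.foldl pvBStep ((pvUpd c 1 (0, 0)).1, (pvUpd c 1 (0, 0)).2, 1, some c) t).2.1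
      = (pvMaxes (c :: t)).2 := by rw [← h4]
  rw [e1, e2]

-- ===== VERDICT (by name: the statement is the Claim_ definition above) =====
theorem checkZeroOnes_spec : Claim_equal_checkZeroOnes := by
  intro s _ hpre
  unfold Spec_checkZeroOnes
  have hne : s.toList ≠ [] := fun h => hpre (String.toList_eq_nil_iff.mp h)
  obtain ⟨c, t, h⟩ : ∃ c t, s.toList = c :: t := by
    cases hl : s.toList with
    | nil => exact absurd hl hne
    | cons c t => exact ⟨c, t, rfl⟩
  rw [checkZeroOnes_eq s c t h, checkZeroOnes_alt_eq s c t h]
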